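-- pv_equiv track=rewrite | github.com/corn8200/weather-fusion | src/weatherfusion/ingest/rss.py | _summarize_precip
-- ===== SOURCE A (Python) =====
-- from typing import Dict, Iterable, List, Tuple
--
-- PRECIP_PRIORITY = [
--     "Freezing Rain",
--     "Ice Pellets",
--     "Snow",
--     "Sleet",
--     "Rain",
--     "Showers",
--     "Drizzle",
--     "Thunderstorms",
-- ]
--
-- def _summarize_precip(types: Iterable[str]) -> Tuple[str | None, str]:
--     seen = list(dict.fromkeys([t for t in types if t]))
--     if not seen:
--         return None, ""
--     for preferred in PRECIP_PRIORITY: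
--         if preferred in seen:
--             primary = preferred
--             break
--     else:  # pragma: no cover - defensive
--         primary = seen[0]
--     notes = ", ".join(seen)
--     return primary, notes
-- ===== SOURCE B (Python) =====
-- PRECIP_PRIORITY = [
--     "Freezing Rain",
--     "Ice Pellets",
--     "Snow",
--     "Sleet",
--     "Rain",
--     "Showers",
--     "Drizzle",
--     "Thunderstorms",
-- ]
--
-- def _summarize_precip(types):
--     seen = list(dict.fromkeys(t for t in types if t))
--     if not seen:
--         return None, ""
--     rank = {name: i for i, name in enumerate(PRECIP_PRIORITY)}
--     primary = min(seen, key=lambda t: rank.get(t, len(PRECIP_PRIORITY)))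
--     return primary, ", ".join(seen)
-- ===== Notes on version B (the rewrite author's own statement) =====
-- stated objective: idiomatic
-- what changed: Instead of scanning the fixed priority list and membership-testing each name against seen, B builds a name-to-rank index once and selects the primary with a single min() over seen keyed by rank (unknown names rank last, min's first-wins tie rule reproducing the seen[0] fallback).
import Mathlib
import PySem

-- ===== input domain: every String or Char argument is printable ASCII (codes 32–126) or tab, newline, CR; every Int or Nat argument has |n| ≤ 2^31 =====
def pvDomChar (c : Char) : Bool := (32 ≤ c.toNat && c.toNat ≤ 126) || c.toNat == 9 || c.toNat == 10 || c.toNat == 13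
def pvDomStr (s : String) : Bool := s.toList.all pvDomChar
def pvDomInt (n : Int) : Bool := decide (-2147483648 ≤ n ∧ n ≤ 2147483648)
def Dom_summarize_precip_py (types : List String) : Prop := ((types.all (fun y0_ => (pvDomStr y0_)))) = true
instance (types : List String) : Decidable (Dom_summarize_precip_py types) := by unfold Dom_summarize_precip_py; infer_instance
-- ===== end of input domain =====

-- B replaces A's scan over the fixed priority list (with membership tests against `seen`)
-- by a rank index built once and a single first-wins min over `seen`; objective: idiomatic.


-- ===== PORT A =====
def PRECIP_PRIORITY : List String :=
  ["Freezing Rain", "Ice Pellets", "Snow", "Sleet", "Rain", "Showers", "Drizzle", "Thunderstorms"]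

def summarize_precip_py (types : List String) : Option String × String :=
  let seen := PySem.List.dedup (types.filter (· != ""))
  match seen with
  | [] => (none, "")
  | s0 :: _ =>
    let primary :=
      match PRECIP_PRIORITY.find? (fun preferred => seen.contains preferred) with
      | some preferred => preferred
      | none => s0
    (some primary, PySem.Str.join ", " seen)

-- ===== PORT B =====
def pvRank : PySem.Dict String Int :=
  (PySem.List.enumerate PRECIP_PRIORITY).foldl (fun d iv => d.insert iv.2 iv.1) PySem.Dict.empty

def summarize_precip_py_alt (types : List String) : Option String × String :=
  let seen := PySem.List.dedup (types.filter (· != ""))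
  match seen with
  | [] => (none, "")
  | _ :: _ =>
    match PySem.List.min? seen (fun t => pvRank.getD t (PRECIP_PRIORITY.length : Int)) with
    | some primary => (some primary, PySem.Str.join ", " seen)
    | none => (none, "")   -- unreachable: seen is nonempty

-- ===== PRECONDITION & SPEC =====
def Spec_summarize_precip_py (types : List String) (out : Option String × String) : Prop := out = summarize_precip_py_alt types
instance (types : List String) (out : Option String × String) : Decidable (Spec_summarize_precip_py types out) := by unfold Spec_summarize_precip_py; infer_instance

-- ===== CLAIM (what is proved, stated in full; the proofs are below) =====
def Claim_equal_summarize_precip_py : Prop := ∀ (types : List String), Dom_summarize_precip_py types → Spec_summarize_precip_py types (summarize_precip_py types)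

-- ===== LEMMAS AND PROOFS =====

-- B's rank key is "index in PRECIP_PRIORITY, or its length if absent" — i.e. List.idxOf.
theorem pvRank_getD_eq (t : String) :
    pvRank.getD t (PRECIP_PRIORITY.length : Int) = ((PRECIP_PRIORITY.idxOf t : Nat) : Int) := by
  have h : pvRank = PySem.Dict.mk [("Freezing Rain", 0), ("Ice Pellets", 1), ("Snow", 2),
      ("Sleet", 3), ("Rain", 4), ("Showers", 5), ("Drizzle", 6), ("Thunderstorms", 7)] := by rfl
  rw [h]
  simp only [PySem.Dict.getD, PySem.Dict.get?_mk_cons, PRECIP_PRIORITY, List.idxOf,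
    List.findIdx_cons, List.length_cons, List.length_nil]
  split_ifs <;> simp_all [Bool.cond_eq_ite, beq_iff_eq, PySem.Dict.get?]

-- the inner step of PySem.List.min?
def pvStep {α : Type} (k : α → Int) (acc : Option α) (x : α) : Option α :=
  match acc with
  | none => some x
  | some m => if k x < k m then some x else some m

theorem pvStep_none {α : Type} (k : α → Int) (x : α) : pvStep k none x = some x := rfl

theorem pvStep_some {α : Type} (k : α → Int) (m x : α) :
    pvStep k (some m) x = if k x < k m then some x else some m := rfl

theorem min?_eq_foldl {α : Type} (xs : List α) (k : α → Int) :
    PySem.List.min? xs k = xs.foldl (pvStep k) none := rfl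

theorem foldl_step_stay {α : Type} (k : α → Int) (t : List α) (c : α)
    (h : ∀ y ∈ t, ¬ k y < k c) : t.foldl (pvStep k) (some c) = some c := by
  induction t with
  | nil => rfl
  | cons y t ih =>
    have hy := h y (by simp)
    rw [List.foldl_cons, pvStep_some, if_neg hy]
    exact ih (fun z hz => h z (List.mem_cons_of_mem _ hz))

theorem foldl_step_min {α : Type} (k : α → Int) (m : α) (t : List α) (c : α)
    (hm : m ∈ t) (hc : k m < k c) (hle : ∀ y ∈ t, k m ≤ k y)
    (huniq : ∀ y ∈ t, k y = k m → y = m) : t.foldl (pvStep k) (some c) = some m := by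
  induction t generalizing c with
  | nil => cases hm
  | cons y t ih =>
    rw [List.foldl_cons, pvStep_some]
    by_cases hym : y = m
    · subst hym
      rw [if_pos hc]
      exact foldl_step_stay k t y (fun z hz => not_lt.mpr (hle z (List.mem_cons_of_mem _ hz)))
    · have hmt : m ∈ t := by
        cases hm with
        | head => exact absurd rfl hym
        | tail _ h => exact h
      have hylt : k m < k y := by
        rcases lt_or_eq_of_le (hle y (by simp)) with h | h
        · exact h
        · exact absurd (huniq y (by simp) h.symm) hym
      split
      · exact ih y hmt hylt (fun z hz => hle z (List.mem_cons_of_mem _ hz))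
          (fun z hz hzm => huniq z (List.mem_cons_of_mem _ hz) hzm)
      · exact ih c hmt hc (fun z hz => hle z (List.mem_cons_of_mem _ hz))
          (fun z hz hzm => huniq z (List.mem_cons_of_mem _ hz) hzm)

-- min? picks the argmin when its key value is achieved only by it
theorem min?_of_unique_min {α : Type} (k : α → Int) (m : α) (xs : List α)
    (hm : m ∈ xs) (hle : ∀ y ∈ xs, k m ≤ k y)
    (huniq : ∀ y ∈ xs, k y = k m → y = m) : PySem.List.min? xs k = some m := by
  cases xs with
  | nil => cases hm
  | cons x t =>
    rw [min?_eq_foldl, List.foldl_cons, pvStep_none]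
    by_cases hxm : x = m
    · subst hxm
      exact foldl_step_stay k t x (fun z hz => not_lt.mpr (hle z (List.mem_cons_of_mem _ hz)))
    · have hmt : m ∈ t := by
        cases hm with
        | head => exact absurd rfl hxm
        | tail _ h => exact h
      have hxlt : k m < k x := by
        rcases lt_or_eq_of_le (hle x (by simp)) with h | h
        · exact h
        · exact absurd (huniq x (by simp) h.symm) hxm
      exact foldl_step_min k m t x hmt hxlt (fun z hz => hle z (List.mem_cons_of_mem _ hz))
        (fun z hz hzm => huniq z (List.mem_cons_of_mem _ hz) hzm)

-- min? only compares keys, so an order-preserving change of key is invisible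
theorem foldl_step_congr {α : Type} (k1 k2 : α → Int) (t : List α) (acc : Option α)
    (hacc : ∀ m, acc = some m → ∀ b ∈ t, (k1 b < k1 m ↔ k2 b < k2 m))
    (h : ∀ a ∈ t, ∀ b ∈ t, (k1 a < k1 b ↔ k2 a < k2 b)) :
    t.foldl (pvStep k1) acc = t.foldl (pvStep k2) acc := by
  induction t generalizing acc with
  | nil => rfl
  | cons y t ih =>
    cases acc with
    | none =>
      rw [List.foldl_cons, List.foldl_cons, pvStep_none, pvStep_none]
      exact ih (some y) (fun m hm b hb => by cases hm; exact h b (List.mem_cons_of_mem _ hb) y (by simp))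
        (fun a ha b hb => h a (List.mem_cons_of_mem _ ha) b (List.mem_cons_of_mem _ hb))
    | some m =>
      rw [List.foldl_cons, List.foldl_cons, pvStep_some, pvStep_some]
      have hiff := hacc m rfl y (by simp)
      by_cases hlt : k1 y < k1 m
      · rw [if_pos hlt, if_pos (hiff.mp hlt)]
        exact ih (some y) (fun n hn b hb => by cases hn; exact h b (List.mem_cons_of_mem _ hb) y (by simp))
          (fun a ha b hb => h a (List.mem_cons_of_mem _ ha) b (List.mem_cons_of_mem _ hb))
      · rw [if_neg hlt, if_neg (fun h2 => hlt (hiff.mpr h2))]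
        exact ih (some m) (fun n hn b hb => by cases hn; exact hacc m rfl b (List.mem_cons_of_mem _ hb))
          (fun a ha b hb => h a (List.mem_cons_of_mem _ ha) b (List.mem_cons_of_mem _ hb))

theorem min?_congr {α : Type} (k1 k2 : α → Int) (xs : List α)
    (h : ∀ a ∈ xs, ∀ b ∈ xs, (k1 a < k1 b ↔ k2 a < k2 b)) :
    PySem.List.min? xs k1 = PySem.List.min? xs k2 := by
  rw [min?_eq_foldl, min?_eq_foldl]
  exact foldl_step_congr k1 k2 xs none (by intro m hm; cases hm) h

theorem idxOf_cons_of_ne {p y : String} (P : List String) (h : ¬ p = y) :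
    List.idxOf y (p :: P) = List.idxOf y P + 1 := by
  simp [List.idxOf, List.findIdx_cons, beq_eq_false_iff_ne.mpr h]

-- the heart: first priority name present in `seen` = first-wins min of `seen` by idxOf rank
theorem main_lemma (P : List String) (s0 : String) (rest : List String) :
    PySem.List.min? (s0 :: rest) (fun t => ((List.idxOf t P : Nat) : Int)) =
      some ((P.find? (fun p => (s0 :: rest).contains p)).getD s0) := by
  induction P with
  | nil =>
    rw [min?_congr _ (fun _ => (0 : Int)) _ (by intro a _ b _; simp [List.idxOf])]
    rw [min?_eq_foldl, List.foldl_cons, pvStep_none]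
    rw [foldl_step_stay _ _ _ (by intro y _; simp)]
    simp
  | cons p P ih =>
    by_cases hp : p ∈ s0 :: rest
    · rw [List.find?_cons_of_pos (show (fun q => (s0 :: rest).contains q) p = true by simpa using hp)]
      apply min?_of_unique_min _ _ _ hp
      · intro y _
        simp [List.idxOf_cons_self]
      · intro y _ hy
        have h0 : List.idxOf y (p :: P) = 0 := by
          rw [List.idxOf_cons_self] at hy
          exact_mod_cast hy
        by_cases hpy : p = y
        · exact hpy.symm
        · rw [idxOf_cons_of_ne P hpy] at h0
          omega
    · have hneg : ¬ ((fun q => (s0 :: rest).contains q) p = true) := by simpa using hp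
      rw [List.find?_cons_of_neg hneg, ← ih]
      apply min?_congr
      intro a ha b hb
      have hap : ¬ p = a := fun h => hp (h ▸ ha)
      have hbp : ¬ p = b := fun h => hp (h ▸ hb)
      rw [idxOf_cons_of_ne P hap, idxOf_cons_of_ne P hbp]
      push_cast
      omega

-- ===== VERDICT (by name: the statement is the Claim_ definition above) =====
theorem summarize_precip_py_spec : Claim_equal_summarize_precip_py := by
  intro types _
  unfold Spec_summarize_precip_py
  cases hseen : PySem.List.dedup (types.filter (· != "")) with
  | nil => simp only [summarize_precip_py, summarize_precip_py_alt, hseen]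
  | cons s0 rest =>
    simp only [summarize_precip_py, summarize_precip_py_alt, hseen]
    rw [show (fun t => pvRank.getD t (PRECIP_PRIORITY.length : Int)) =
        (fun t => ((List.idxOf t PRECIP_PRIORITY : Nat) : Int)) from funext pvRank_getD_eq,
      main_lemma]
    cases h : PRECIP_PRIORITY.find? (fun preferred => (s0 :: rest).contains preferred) <;> simp
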